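-- pv_equiv track=rewrite | github.com/arozumenko/wikis | .github/skills/obsidian-vault/scripts/vault.py | _split_flow_list
-- ===== SOURCE A (Python) =====
-- def _strip_quotes(s: str) -> str:
--     if len(s) >= 2 and ((s[0] == '"' and s[-1] == '"') or (s[0] == "'" and s[-1] == "'")):
--         return s[1:-1].replace('\\"', '"')
--     return s
--
-- def _split_flow_list(inner: str) -> list[str]:
--     """Split a flow-style YAML list body, respecting [[...]] wikilinks."""
--     items: list[str] = []
--     depth = 0
--     buf = ""
--     for ch in inner:
--         if ch == "[":
--             depth += 1
--         elif ch == "]":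
--             depth -= 1
--         if ch == "," and depth == 0:
--             items.append(_strip_quotes(buf.strip()))
--             buf = ""
--         else:
--             buf += ch
--     if buf.strip():
--         items.append(_strip_quotes(buf.strip()))
--     return items
-- ===== SOURCE B (Python) =====
-- def _strip_quotes(s: str) -> str:
--     if len(s) >= 2 and ((s[0] == '"' and s[-1] == '"') or (s[0] == "'" and s[-1] == "'")):
--         return s[1:-1].replace('\\"', '"')
--     return s
--
-- def _top_comma(s: str) -> int:
--     """Index of the first comma at bracket depth 0, or -1."""
--     depth = 0
--     for i, ch in enumerate(s):
--         if ch == "[":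
--             depth += 1
--         elif ch == "]":
--             depth -= 1
--         elif ch == "," and depth == 0:
--             return i
--     return -1
--
-- def _split_flow_list(inner: str) -> list[str]:
--     """Split a flow-style YAML list body, respecting [[...]] wikilinks."""
--     pieces = []
--     rest = inner
--     while True:
--         cut = _top_comma(rest)
--         if cut < 0:
--             break
--         pieces.append(rest[:cut])
--         rest = rest[cut + 1:]
--     items = [_strip_quotes(p.strip()) for p in pieces]
--     tail = rest.strip()
--     if tail:
--         items.append(_strip_quotes(tail))
--     return items
-- ===== Notes on version B (the rewrite author's own statement) =====
-- stated objective: alternative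
-- what changed: B separates boundary-finding from element transformation: a helper finds the next depth-0 comma, the body slices the input into raw pieces by repeated cut, and a second pass strips/unquotes the pieces (dropping only a whitespace-only final piece), instead of A's single character loop that interleaves depth tracking, buffering and strip/append decisions.
import Mathlib
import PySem

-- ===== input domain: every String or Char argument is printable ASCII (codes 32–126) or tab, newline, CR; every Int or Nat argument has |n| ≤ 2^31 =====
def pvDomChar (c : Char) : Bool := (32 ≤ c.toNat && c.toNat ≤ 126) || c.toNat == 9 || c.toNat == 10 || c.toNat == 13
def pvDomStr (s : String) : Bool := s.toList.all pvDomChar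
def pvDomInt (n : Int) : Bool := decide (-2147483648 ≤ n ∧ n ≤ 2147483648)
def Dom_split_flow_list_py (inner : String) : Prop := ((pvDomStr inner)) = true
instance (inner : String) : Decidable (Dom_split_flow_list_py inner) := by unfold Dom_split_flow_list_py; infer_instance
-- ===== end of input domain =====

-- B separates boundary-finding (cut at each depth-0 comma) from element transformation
-- (strip/unquote in a second pass); same O(n) cost, different decomposition ("alternative").

-- ===== PORT A =====
-- _strip_quotes (shared same-module helper of both Pythons), on List Char
def pvStripQuotes (s : List Char) : List Char :=
  if 2 ≤ s.length ∧ ((s.headD ' ' = '"' ∧ s.getLastD ' ' = '"') ∨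
      (s.headD ' ' = '\'' ∧ s.getLastD ' ' = '\'')) then
    PySem.Chars.replace ((s.drop 1).dropLast) ['\\', '"'] ['"']
  else s

-- _strip_quotes(buf.strip()) as a String (the appended item in both Pythons)
def pvFinish (buf : List Char) : String := String.ofList (pvStripQuotes (PySem.Chars.strip buf))

-- A's character loop (depth update, then split-or-buffer), final flush as the base case
def pvLoopA (items : List String) (depth : Int) (buf : List Char) : List Char → List String
  | [] => if PySem.Chars.strip buf ≠ [] then items ++ [pvFinish buf] else items
  | c :: cs =>
    let depth' := if c = '[' then depth + 1 else if c = ']' then depth - 1 else depth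
    if c = ',' ∧ depth' = 0 then pvLoopA (items ++ [pvFinish buf]) depth' [] cs
    else pvLoopA items depth' (buf ++ [c]) cs

def split_flow_list_py (inner : String) : List String := pvLoopA [] 0 [] inner.toList

-- ===== PORT B =====
-- _top_comma + the slices rest[:cut], rest[cut+1:] fused: the part before the first
-- depth-0 comma and the part after it (none = no such comma)
def pvTopSplit : Int → List Char → Option (List Char × List Char)
  | _, [] => none
  | d, c :: cs =>
    if c = '[' then (pvTopSplit (d + 1) cs).map (fun p => (c :: p.1, p.2))
    else if c = ']' then (pvTopSplit (d - 1) cs).map (fun p => (c :: p.1, p.2))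
    else if c = ',' ∧ d = 0 then some ([], cs)
    else (pvTopSplit d cs).map (fun p => (c :: p.1, p.2))

-- termination helper for pvSplitAll (cited in decreasing_by)
theorem pvTopSplit_lt : ∀ (cs : List Char) (d : Int) (p : List Char × List Char),
    pvTopSplit d cs = some p → p.2.length < cs.length := by
  intro cs
  induction cs with
  | nil => intro d p h; simp [pvTopSplit] at h
  | cons c cs ih =>
    intro d p h
    simp only [pvTopSplit] at h
    split_ifs at h with h1 h2 h3
    · rcases Option.map_eq_some_iff.mp h with ⟨q, hq, rfl⟩
      exact Nat.lt_succ_of_lt (ih _ q hq)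
    · rcases Option.map_eq_some_iff.mp h with ⟨q, hq, rfl⟩
      exact Nat.lt_succ_of_lt (ih _ q hq)
    · cases h; simp
    · rcases Option.map_eq_some_iff.mp h with ⟨q, hq, rfl⟩
      exact Nat.lt_succ_of_lt (ih _ q hq)

-- B's while loop: cut off pieces at depth-0 commas; the remainder is the last piece
def pvSplitAll (cs : List Char) : List (List Char) :=
  match _h : pvTopSplit 0 cs with
  | none => [cs]
  | some p => p.1 :: pvSplitAll p.2
termination_by cs.length
decreasing_by exact pvTopSplit_lt cs 0 p _h

-- B's second pass: transform every piece; the last one only if non-blank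
def pvRender : List (List Char) → List String
  | [] => []
  | [p] => if PySem.Chars.strip p = [] then [] else [pvFinish p]
  | p :: ps => pvFinish p :: pvRender ps

def split_flow_list_py_alt (inner : String) : List String := pvRender (pvSplitAll inner.toList)

-- ===== PRECONDITION & SPEC =====
def Spec_split_flow_list_py (inner : String) (out : List String) : Prop := out = split_flow_list_py_alt inner
instance (inner : String) (out : List String) : Decidable (Spec_split_flow_list_py inner out) := by unfold Spec_split_flow_list_py; infer_instance

-- ===== CLAIM (what is proved, stated in full; the proofs are below) =====
def Claim_equal_split_flow_list_py : Prop := ∀ (inner : String), Dom_split_flow_list_py inner → Spec_split_flow_list_py inner (split_flow_list_py inner)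

-- ===== LEMMAS AND PROOFS =====

theorem pvSplitAll_ne_nil (cs : List Char) : pvSplitAll cs ≠ [] := by
  rw [pvSplitAll]; split <;> simp

theorem pvRender_cons (p : List Char) (ps : List (List Char)) (h : ps ≠ []) :
    pvRender (p :: ps) = pvFinish p :: pvRender ps := by
  cases ps with
  | nil => exact absurd rfl h
  | cons q qs => rfl

-- one-step characterisation of B's result in terms of the first depth-0 cut
theorem pvRender_splitAll (cs : List Char) :
    pvRender (pvSplitAll cs) =
      match pvTopSplit 0 cs with
      | none => if PySem.Chars.strip cs = [] then [] else [pvFinish cs]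
      | some p => pvFinish p.1 :: pvRender (pvSplitAll p.2) := by
  rw [pvSplitAll]
  cases h : pvTopSplit 0 cs with
  | none => rfl
  | some p => exact pvRender_cons p.1 (pvSplitAll p.2) (pvSplitAll_ne_nil p.2)

-- loop invariant: A's loop from any state equals the already-emitted items plus
-- B's rendering of the remainder (current buffer prepended to the first piece)
theorem pvLoopA_eq : ∀ (cs : List Char) (d : Int) (buf : List Char) (items : List String),
    pvLoopA items d buf cs =
      items ++ (match pvTopSplit d cs with
        | none => if PySem.Chars.strip (buf ++ cs) = [] then [] else [pvFinish (buf ++ cs)]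
        | some p => pvFinish (buf ++ p.1) :: pvRender (pvSplitAll p.2)) := by
  intro cs
  induction cs with
  | nil =>
    intro d buf items
    simp only [pvLoopA, pvTopSplit, List.append_nil]
    by_cases h : PySem.Chars.strip buf = [] <;> simp [h]
  | cons c cs ih =>
    intro d buf items
    simp only [pvLoopA, pvTopSplit]
    by_cases h1 : c = '['
    · subst h1
      simp only [ih]
      cases h : pvTopSplit (d + 1) cs <;> simp [h]
    · by_cases h2 : c = ']'
      · subst h2
        simp only [ih]
        cases h : pvTopSplit (d - 1) cs <;> simp [h]
      · by_cases h3 : c = ',' ∧ d = 0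
        · obtain ⟨rfl, rfl⟩ := h3
          simp only [ih]
          cases h : pvTopSplit 0 cs <;> simp [h, pvRender_splitAll cs]
        · have hd : (if c = '[' then d + 1 else if c = ']' then d - 1 else d) = d := by
            simp [h1, h2]
          simp only [ih, hd]
          cases h : pvTopSplit d cs <;> simp [h, h1, h2, h3]

-- ===== VERDICT (by name: the statement is the Claim_ definition above) =====
theorem split_flow_list_py_spec : Claim_equal_split_flow_list_py := by
  intro inner _
  unfold Spec_split_flow_list_py split_flow_list_py split_flow_list_py_alt
  rw [pvLoopA_eq, pvRender_splitAll]
  cases h : pvTopSplit 0 inner.toList with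
  | none => simp
  | some p => simp
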